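-- pv_equiv track=rewrite | github.com/sukolsak/kpd_opt | src_py/file_io/graph_io.py | sort_cycle
-- ===== SOURCE A (Python) =====
-- import math
--
-- def sort_cycle(cycle, weights):
--     n = len(cycle)
--     min_vertex = math.inf
--     min_index = 0
--     for index, vertex in enumerate(cycle):
--         if vertex < min_vertex:
--             min_vertex = vertex
--             min_index = index
--     gen = [(i + min_index) % n for i in range(n)]
--     cycle_sorted = [cycle[j] for j in gen]
--     weights_sorted = [weights[j] for j in gen]
--     return cycle_sorted, weights_sorted
-- ===== SOURCE B (Python) =====
-- def sort_cycle(cycle, weights):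
--     # Single pass: keep two accumulators, 'pre' (pairs before the best split point)
--     # and 'suf' (pairs from the split point on); flush suf into pre on each new
--     # strict minimum. No indexing, no second pass over the data.
--     best = None
--     pre = []
--     suf = []
--     for pair in zip(cycle, weights):
--         if best is None or pair[0] < best:
--             best = pair[0]
--             pre += suf
--             suf = [pair]
--         else:
--             suf.append(pair)
--     rot = suf + pre
--     return [v for v, _ in rot], [w for _, w in rot]
-- ===== Notes on version B (the rewrite author's own statement) =====
-- stated objective: alternative
-- what changed: B makes a single pass over zip(cycle, weights) maintaining two accumulator lists (pairs before / after the current best split point), flushing one into the other at each new strict minimum, and concatenates them at the end; A first scans for the argmin and then makes two extra modular-index passes to build the rotated lists.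
import Mathlib
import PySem

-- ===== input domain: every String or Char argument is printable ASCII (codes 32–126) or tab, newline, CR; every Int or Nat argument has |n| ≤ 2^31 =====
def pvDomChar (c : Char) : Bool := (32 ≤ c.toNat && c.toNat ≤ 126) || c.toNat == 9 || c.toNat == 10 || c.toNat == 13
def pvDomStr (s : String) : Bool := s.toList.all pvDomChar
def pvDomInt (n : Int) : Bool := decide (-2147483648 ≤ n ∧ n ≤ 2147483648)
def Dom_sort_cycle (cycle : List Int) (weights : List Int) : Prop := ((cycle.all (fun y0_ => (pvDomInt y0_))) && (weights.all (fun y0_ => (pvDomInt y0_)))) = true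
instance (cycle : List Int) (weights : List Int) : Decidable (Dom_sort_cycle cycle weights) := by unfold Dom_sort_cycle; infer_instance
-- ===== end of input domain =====

-- B makes ONE pass over the zipped (vertex, weight) pairs with two accumulator lists,
-- flushed at each new strict minimum, instead of A's argmin scan followed by two
-- modular-index comprehensions (objective: alternative).

-- ===== PORT A =====
def sort_cycle (cycle : List Int) (weights : List Int) : List Int × List Int :=
  let n : Int := (cycle.length : Int)
  -- min_vertex starts at math.inf; modelled as Option Int with none = inf ('vertex < inf' is always true)
  let st := (PySem.List.enumerate cycle 0).foldl
    (fun (s : Option Int × Int) p =>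
      match s.1 with
      | none => (some p.2, p.1)
      | some m => if p.2 < m then (some p.2, p.1) else s)
    (none, 0)
  let min_index := st.2
  let gen := (PySem.List.pyRange 0 n 1).map (fun i => PySem.Int.mod (i + min_index) n)
  let cycle_sorted := gen.map (fun j => PySem.List.pyGetD cycle j 0)
  let weights_sorted := gen.map (fun j => PySem.List.pyGetD weights j 0)
  (cycle_sorted, weights_sorted)

-- ===== PORT B =====
def sort_cycle_alt (cycle : List Int) (weights : List Int) : List Int × List Int :=
  let st := (cycle.zip weights).foldl
    (fun (s : Option Int × List (Int × Int) × List (Int × Int)) p =>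
      match s.1 with
      | none => (some p.1, s.2.1 ++ s.2.2, [p])
      | some b => if p.1 < b then (some p.1, s.2.1 ++ s.2.2, [p])
                  else (s.1, s.2.1, s.2.2 ++ [p]))
    (none, [], [])
  let rot := st.2.2 ++ st.2.1
  (rot.map Prod.fst, rot.map Prod.snd)

-- ===== PRECONDITION & SPEC =====
-- Pre_ excludes exactly the inputs on which A raises IndexError: a nonempty cycle with
-- fewer weights than vertices (A reads weights[j] for every j < len(cycle)).
def Pre_sort_cycle (cycle : List Int) (weights : List Int) : Prop :=
  cycle.length ≤ weights.length
instance (cycle : List Int) (weights : List Int) : Decidable (Pre_sort_cycle cycle weights) := by unfold Pre_sort_cycle; infer_instance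

def pvWitness_sort_cycle : List Int × List Int := ([3, 1, 2], [10, 20, 30])

def Spec_sort_cycle (cycle : List Int) (weights : List Int) (out : List Int × List Int) : Prop := out = sort_cycle_alt cycle weights
instance (cycle : List Int) (weights : List Int) (out : List Int × List Int) : Decidable (Spec_sort_cycle cycle weights out) := by unfold Spec_sort_cycle; infer_instance

-- ===== CLAIM (what is proved, stated in full; the proofs are below) =====
def Claim_equal_sort_cycle : Prop := ∀ (cycle : List Int) (weights : List Int), Dom_sort_cycle cycle weights → Pre_sort_cycle cycle weights → Spec_sort_cycle cycle weights (sort_cycle cycle weights)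

-- ===== LEMMAS AND PROOFS =====

lemma foldl_min_le (t : List Int) (x : Int) : t.foldl min x ≤ x := by
  induction t generalizing x with
  | nil => simp
  | cons y t ih => simpa using le_trans (ih (min x y)) (min_le_left x y)

lemma foldl_min_mem (t : List Int) (x : Int) (h : t.foldl min x < x) : t.foldl min x ∈ t := by
  induction t generalizing x with
  | nil => simp at h
  | cons y t ih =>
    simp only [List.foldl_cons] at h ⊢
    by_cases hy : t.foldl min (min x y) < min x y
    · exact List.mem_cons_of_mem _ (ih _ hy)
    · have heq : t.foldl min (min x y) = min x y :=
        le_antisymm (foldl_min_le t (min x y)) (not_lt.1 hy)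
      rw [heq] at h ⊢
      have : min x y = y := by
        rcases le_total x y with hxy | hxy
        · rw [min_eq_left hxy] at h; omega
        · exact min_eq_right hxy
      simp [this]

lemma foldA_char (xs : List Int) (s m idx : Int) :
    (PySem.List.enumerate xs s).foldl
      (fun (st : Option Int × Int) p =>
        match st.1 with
        | none => (some p.2, p.1)
        | some m' => if p.2 < m' then (some p.2, p.1) else st)
      (some m, idx)
    = (some (xs.foldl min m),
       if xs.foldl min m < m
       then s + (((PySem.List.index? xs (xs.foldl min m)).getD 0 : Nat) : Int)
       else idx) := by
  induction xs generalizing s m idx with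
  | nil => simp
  | cons x t ih =>
    rw [PySem.List.enumerate_cons]
    simp only [List.foldl_cons]
    by_cases hx : x < m
    · simp only [hx, if_true]
      rw [ih (s + 1) x s]
      have hmin : min m x = x := min_eq_right (le_of_lt hx)
      simp only [hmin]
      by_cases ht : t.foldl min x < x
      · have hmem : t.foldl min x ∈ t := foldl_min_mem t x ht
        have hne : x ≠ t.foldl min x := by omega
        rw [PySem.List.index?_cons_of_ne t hne]
        rcases Option.isSome_iff_exists.1
          ((PySem.List.index?_isSome_iff (xs := t) (v := t.foldl min x)).2 hmem) with ⟨j, hj⟩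
        rw [hj]
        have hcond : t.foldl min x < m := lt_trans ht hx
        simp only [ht, hcond, if_true, Option.map_some, Option.getD_some]
        simp only [Prod.mk.injEq, true_and]
        push_cast
        omega
      · have heq : t.foldl min x = x := le_antisymm (foldl_min_le t x) (not_lt.1 ht)
        rw [heq, PySem.List.index?_cons_self]
        simp [hx]
    · simp only [hx, if_false]
      rw [ih (s + 1) m idx]
      have hmin : min m x = m := min_eq_left (not_lt.1 hx)
      simp only [hmin]
      by_cases ht : t.foldl min m < m
      · have hmem : t.foldl min m ∈ t := foldl_min_mem t m ht
        have hne : x ≠ t.foldl min m := by omega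
        rw [PySem.List.index?_cons_of_ne t hne]
        rcases Option.isSome_iff_exists.1
          ((PySem.List.index?_isSome_iff (xs := t) (v := t.foldl min m)).2 hmem) with ⟨j, hj⟩
        rw [hj]
        simp only [ht, if_true, Option.map_some, Option.getD_some]
        simp only [Prod.mk.injEq, true_and]
        push_cast
        omega
      · simp [ht]

lemma rot_eq (xs : List Int) (d : Int) (n i : Nat) (hn : n ≤ xs.length) (hi : i < n) :
    (PySem.List.pyRange 0 (n : Int) 1).map
        (fun j => PySem.List.pyGetD xs (PySem.Int.mod (j + (i : Int)) (n : Int)) d)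
      = ((xs.take n).drop i) ++ ((xs.take n).take i) := by
  have hnpos : (0 : Int) < (n : Int) := by exact_mod_cast Nat.pos_of_ne_zero (by omega)
  apply List.ext_getElem
  · simp [PySem.List.length_pyRange_one]
    omega
  · intro k h1 h2
    have hk : k < n := by
      simpa [PySem.List.length_pyRange_one] using h1
    rw [List.getElem_map, PySem.List.getElem_pyRange_one, PySem.Int.mod_eq_emod_of_pos hnpos]
    by_cases hc : k + i < n
    · have hb : ((0 : Int) + (k : Int) + (i : Int)) % (n : Int) = ((k + i : Nat) : Int) := by
        rw [zero_add]
        push_cast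
        exact Int.emod_eq_of_lt (by positivity) (by exact_mod_cast hc)
      rw [hb, PySem.List.pyGetD_eq_getElem xs d (by positivity) (by omega)]
      rw [List.getElem_append_left (by simp; omega)]
      rw [List.getElem_drop, List.getElem_take]
      congr 1
      simp
      omega
    · have hb : ((0 : Int) + (k : Int) + (i : Int)) % (n : Int) = ((k + i - n : Nat) : Int) := by
        rw [zero_add, Nat.cast_sub (by omega : n ≤ k + i)]
        push_cast
        rw [← Int.sub_emod_right ((k : Int) + (i : Int)) (n : Int)]
        exact Int.emod_eq_of_lt (by push_cast; omega) (by push_cast; omega)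
      rw [hb, PySem.List.pyGetD_eq_getElem xs d (by positivity) (by push_cast; omega)]
      rw [List.getElem_append_right (by simp; omega)]
      rw [List.getElem_take, List.getElem_take]
      congr 1
      simp
      omega

lemma zip_take_right {α β : Type} (xs : List α) (ys : List β) :
    xs.zip ys = xs.zip (ys.take xs.length) := by
  induction xs generalizing ys with
  | nil => simp
  | cons x t ih =>
    cases ys with
    | nil => simp
    | cons y u => simp [List.zip_cons_cons, ih u]

lemma foldB_char (ps : List (Int × Int)) (b : Int) (pre suf : List (Int × Int)) :
    ps.foldl
      (fun (s : Option Int × List (Int × Int) × List (Int × Int)) p =>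
        match s.1 with
        | none => (some p.1, s.2.1 ++ s.2.2, [p])
        | some b' => if p.1 < b' then (some p.1, s.2.1 ++ s.2.2, [p])
                     else (s.1, s.2.1, s.2.2 ++ [p]))
      (some b, pre, suf)
    = (some ((ps.map Prod.fst).foldl min b),
       if (ps.map Prod.fst).foldl min b < b
       then pre ++ suf ++ ps.take ((PySem.List.index? (ps.map Prod.fst) ((ps.map Prod.fst).foldl min b)).getD 0)
       else pre,
       if (ps.map Prod.fst).foldl min b < b
       then ps.drop ((PySem.List.index? (ps.map Prod.fst) ((ps.map Prod.fst).foldl min b)).getD 0)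
       else suf ++ ps) := by
  induction ps generalizing b pre suf with
  | nil => simp
  | cons p t ih =>
    simp only [List.foldl_cons, List.map_cons]
    by_cases hx : p.1 < b
    · simp only [hx, if_true]
      rw [ih p.1 (pre ++ suf) [p]]
      have hmin : min b p.1 = p.1 := min_eq_right (le_of_lt hx)
      simp only [hmin]
      set m := (t.map Prod.fst).foldl min p.1 with hm
      by_cases ht : m < p.1
      · have hmem : m ∈ t.map Prod.fst := foldl_min_mem _ _ ht
        have hne : p.1 ≠ m := by omega
        rw [PySem.List.index?_cons_of_ne _ hne]
        rcases Option.isSome_iff_exists.1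
          ((PySem.List.index?_isSome_iff (xs := t.map Prod.fst) (v := m)).2 hmem) with ⟨j, hj⟩
        rw [hj]
        have hcond : m < b := lt_trans ht hx
        simp only [ht, hcond, if_true, Option.map_some, Option.getD_some]
        simp [List.take_succ_cons, List.drop_succ_cons, List.append_assoc]
      · have heq : m = p.1 := le_antisymm (foldl_min_le _ _) (not_lt.1 ht)
        rw [heq, PySem.List.index?_cons_self]
        simp [hx, ht]
    · simp only [hx, if_false]
      rw [ih b pre (suf ++ [p])]
      have hmin : min b p.1 = b := min_eq_left (not_lt.1 hx)
      simp only [hmin]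
      set m := (t.map Prod.fst).foldl min b with hm
      by_cases ht : m < b
      · have hmem : m ∈ t.map Prod.fst := foldl_min_mem _ _ ht
        have hne : p.1 ≠ m := by omega
        rw [PySem.List.index?_cons_of_ne _ hne]
        rcases Option.isSome_iff_exists.1
          ((PySem.List.index?_isSome_iff (xs := t.map Prod.fst) (v := m)).2 hmem) with ⟨j, hj⟩
        rw [hj]
        simp only [ht, if_true, Option.map_some, Option.getD_some]
        simp [List.take_succ_cons, List.drop_succ_cons, List.append_assoc]
      · simp [ht]

-- ===== VERDICT (by name: the statement is the Claim_ definition above) =====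
theorem sort_cycle_spec : Claim_equal_sort_cycle := by
  intro cycle weights _ hpre
  unfold Spec_sort_cycle
  unfold Pre_sort_cycle at hpre
  cases cycle with
  | nil => simp [sort_cycle, sort_cycle_alt, PySem.List.pyRange_one_eq_nil (le_refl (0 : Int))]
  | cons c rest =>
    cases weights with
    | nil => simp at hpre
    | cons w ws =>
    have hlen : rest.length ≤ ws.length := by simpa using hpre
    -- B side
    simp only [sort_cycle_alt, List.zip_cons_cons, List.foldl_cons, List.nil_append]
    rw [foldB_char (rest.zip ws) c [] [(c, w)]]
    have hfst : (rest.zip ws).map Prod.fst = rest := by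
      rw [zip_take_right rest ws, List.map_fst_zip (by simp; omega)]
    rw [hfst]
    set mv := rest.foldl min c with hmv
    -- A side
    simp only [sort_cycle, PySem.List.enumerate_cons, List.foldl_cons, zero_add]
    rw [foldA_char rest 1 c 0]
    -- common index i into (c :: rest)
    have hidx : (if mv < c then (1 : Int) + (((PySem.List.index? rest mv).getD 0 : Nat) : Int) else 0)
        = (((PySem.List.index? (c :: rest) mv).getD 0 : Nat) : Int) := by
      by_cases hlt : mv < c
      · have hmem : mv ∈ rest := foldl_min_mem rest c hlt
        have hne : c ≠ mv := by omega
        rw [PySem.List.index?_cons_of_ne rest hne]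
        rcases Option.isSome_iff_exists.1
          ((PySem.List.index?_isSome_iff (xs := rest) (v := mv)).2 hmem) with ⟨j, hj⟩
        rw [hj]
        simp only [hlt, if_true, Option.map_some, Option.getD_some]
        push_cast
        ring
      · have heq : mv = c := le_antisymm (foldl_min_le rest c) (not_lt.1 hlt)
        rw [heq, PySem.List.index?_cons_self]
        simp [hlt]
    rw [hidx]
    set i : Nat := (PySem.List.index? (c :: rest) mv).getD 0 with hidef
    have hmemc : mv ∈ (c :: rest) := by
      by_cases hlt : mv < c
      · exact List.mem_cons_of_mem _ (foldl_min_mem rest c hlt)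
      · have : mv = c := le_antisymm (foldl_min_le rest c) (not_lt.1 hlt)
        simp [this]
    rcases Option.isSome_iff_exists.1
      ((PySem.List.index?_isSome_iff (xs := c :: rest) (v := mv)).2 hmemc) with ⟨j, hj⟩
    rcases PySem.List.getElem_of_index?_eq_some hj with ⟨hjlt, -, -⟩
    have hji : i = j := by rw [hidef, hj]; rfl
    have hilt : i < (c :: rest).length := by omega
    -- B's accumulators as take/drop of the pair list at i
    have hBpair :
        (if mv < c
         then (rest.zip ws).drop ((PySem.List.index? rest mv).getD 0)
         else [(c, w)] ++ rest.zip ws) ++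
        (if mv < c
         then [] ++ [(c, w)] ++ (rest.zip ws).take ((PySem.List.index? rest mv).getD 0)
         else [])
        = ((c, w) :: rest.zip ws).drop i ++ ((c, w) :: rest.zip ws).take i := by
      by_cases hlt : mv < c
      · have hmem : mv ∈ rest := foldl_min_mem rest c hlt
        have hne : c ≠ mv := by omega
        have hi1 : i = (PySem.List.index? rest mv).getD 0 + 1 := by
          rw [hidef, PySem.List.index?_cons_of_ne rest hne]
          rcases Option.isSome_iff_exists.1
            ((PySem.List.index?_isSome_iff (xs := rest) (v := mv)).2 hmem) with ⟨j', hj'⟩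
          rw [hj']
          simp [Nat.succ_eq_add_one]
        rw [hi1]
        simp [hlt, List.take_succ_cons, List.drop_succ_cons]
      · have heq : mv = c := le_antisymm (foldl_min_le rest c) (not_lt.1 hlt)
        have hi0 : i = 0 := by rw [hidef, heq, PySem.List.index?_cons_self]; rfl
        rw [hi0]
        simp [hlt]
    simp only [hBpair]
    -- now rewrite A's two maps
    rw [List.map_map, List.map_map]
    simp only [Function.comp_def]
    rw [rot_eq (c :: rest) 0 (c :: rest).length i (le_refl _) hilt]
    rw [rot_eq (w :: ws) 0 (c :: rest).length i (by simpa using hpre) hilt]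
    rw [List.map_append, List.map_append]
    rw [List.map_drop, List.map_take, List.map_drop, List.map_take]
    have hzf : ((c, w) :: rest.zip ws).map Prod.fst = c :: rest := by simp [hfst]
    have hzs : ((c, w) :: rest.zip ws).map Prod.snd = (w :: ws).take (c :: rest).length := by
      have : (c, w) :: rest.zip ws = (c :: rest).zip (w :: ws) := by simp
      rw [this, zip_take_right (c :: rest) (w :: ws),
        List.map_snd_zip (by simp)]
    rw [hzf, hzs, List.take_length]
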